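-- pv_equiv track=rewrite | github.com/DennisLiu94/alimusic_contest_16 | get_average.py | get_artist_play
-- ===== SOURCE A (Python) =====
-- def get_artist_play(artist2song,play):
--     res=[]
--     artist=artist2song.keys()
--
--     for counter in play:
--         tmp={}
--         for ar in artist:
--             songs=artist2song[ar]
--             for song in songs:
--                 if song in counter:
--                     if not ar in tmp:
--                         tmp[ar]=counter[song]
--                     else:
--                         tmp[ar]+=counter[song]
--         res.append(tmp)
--     return res
-- ===== SOURCE B (Python) =====
-- def get_artist_play(artist2song, play):
--     # Inverted index: song -> artists (with multiplicity), built once.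
--     song2artists = {}
--     for ar in artist2song:
--         for s in artist2song[ar]:
--             song2artists.setdefault(s, []).append(ar)
--     res = []
--     for counter in play:
--         acc = {}
--         for song in counter:
--             for ar in song2artists.get(song, ()):
--                 acc[ar] = acc.get(ar, 0) + counter[song]
--         res.append({ar: acc[ar] for ar in artist2song if ar in acc})
--     return res
-- ===== Notes on version B (the rewrite author's own statement) =====
-- stated objective: faster
-- what changed: B precomputes an inverted song->artists index once and, per play counter, iterates only the counter's own keys (then reorders by artist order), instead of scanning every artist's whole song list for every counter.
import Mathlib
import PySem

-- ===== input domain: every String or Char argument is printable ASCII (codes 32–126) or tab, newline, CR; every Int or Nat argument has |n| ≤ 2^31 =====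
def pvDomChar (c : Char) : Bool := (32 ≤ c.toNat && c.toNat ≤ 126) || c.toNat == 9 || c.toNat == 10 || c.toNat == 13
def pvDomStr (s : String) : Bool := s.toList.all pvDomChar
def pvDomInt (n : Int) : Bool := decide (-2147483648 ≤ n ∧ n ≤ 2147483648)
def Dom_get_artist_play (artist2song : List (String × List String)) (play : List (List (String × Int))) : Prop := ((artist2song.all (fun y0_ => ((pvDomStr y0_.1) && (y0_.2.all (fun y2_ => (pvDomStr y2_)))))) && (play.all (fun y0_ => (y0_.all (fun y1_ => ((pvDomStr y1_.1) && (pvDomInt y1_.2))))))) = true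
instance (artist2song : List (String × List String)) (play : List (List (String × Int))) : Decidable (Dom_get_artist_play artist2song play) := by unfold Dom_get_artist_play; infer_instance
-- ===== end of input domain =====

-- B replaces A's per-counter scan over every artist's full song list by a precomputed
-- inverted song->artists index consulted only for the counter's own keys (objective: faster).


-- ===== PORT A =====
def get_artist_play (artist2song : List (String × List String)) (play : List (List (String × Int))) : List (List (String × Int)) :=
  let d := PySem.Dict.ofList artist2song
  let artist := d.keys
  play.foldl (fun res counter =>
    let c := PySem.Dict.ofList counter
    let tmp := artist.foldl (fun tmp ar =>
      let songs := d.getD ar []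
      songs.foldl (fun tmp song =>
        if c.contains song then
          if !(tmp.contains ar) then tmp.insert ar (c.getD song 0)
          else tmp.insert ar (tmp.getD ar 0 + c.getD song 0)
        else tmp) tmp) (PySem.Dict.empty : PySem.Dict String Int)
    res ++ [tmp.items]) []

-- ===== PORT B =====
def get_artist_play_alt (artist2song : List (String × List String)) (play : List (List (String × Int))) : List (List (String × Int)) :=
  let d := PySem.Dict.ofList artist2song
  let s2a := d.items.foldl (fun m p =>
      p.2.foldl (fun m s => m.modify s [] (· ++ [p.1])) m)
    (PySem.Dict.empty : PySem.Dict String (List String))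
  play.foldl (fun res counter =>
    let c := PySem.Dict.ofList counter
    let acc := c.items.foldl (fun acc q =>
        (s2a.getD q.1 []).foldl (fun acc ar => acc.insert ar (acc.getD ar 0 + q.2)) acc)
      (PySem.Dict.empty : PySem.Dict String Int)
    res ++ [(d.keys.foldl (fun out ar =>
        match acc.get? ar with
        | some v => out.insert ar v
        | none => out) (PySem.Dict.empty : PySem.Dict String Int)).items]) []

-- ===== PRECONDITION & SPEC =====
def Spec_get_artist_play (artist2song : List (String × List String)) (play : List (List (String × Int))) (out : List (List (String × Int))) : Prop := out = get_artist_play_alt artist2song play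
instance (artist2song : List (String × List String)) (play : List (List (String × Int))) (out : List (List (String × Int))) : Decidable (Spec_get_artist_play artist2song play out) := by unfold Spec_get_artist_play; infer_instance

-- ===== CLAIM (what is proved, stated in full; the proofs are below) =====
def Claim_equal_get_artist_play : Prop := ∀ (artist2song : List (String × List String)) (play : List (List (String × Int))), Dom_get_artist_play artist2song play → Spec_get_artist_play artist2song play (get_artist_play artist2song play)

-- ===== LEMMAS AND PROOFS =====

-- Abbreviation used only by the proofs (A's per-artist accumulated value, as an Option fold).
def vfold (c : PySem.Dict String Int) (songs : List String) (o : Option Int) : Option Int :=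
  songs.foldl (fun o s => if c.contains s then some (o.getD 0 + c.getD s 0) else o) o

def csum (c : PySem.Dict String Int) (songs : List String) : Int :=
  (songs.map (fun s => c.getD s 0)).sum

lemma vfold_some (c : PySem.Dict String Int) :
    ∀ (songs : List String) (v : Int), vfold c songs (some v) = some (v + csum c songs) := by
  intro songs
  induction songs with
  | nil => intro v; simp [vfold, csum]
  | cons s rest ih =>
    intro v
    by_cases h : c.contains s
    · have hstep : vfold c (s :: rest) (some v) = vfold c rest (some (v + c.getD s 0)) := by
        simp [vfold, h]
      rw [hstep, ih]; simp [csum]; ring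
    · have h0 : c.getD s 0 = 0 := PySem.Dict.getD_of_not_contains _ _ (by simpa using h)
      have hstep : vfold c (s :: rest) (some v) = vfold c rest (some v) := by
        simp [vfold, h]
      rw [hstep, ih]; simp [csum, h0]

lemma vfold_none (c : PySem.Dict String Int) :
    ∀ (songs : List String), vfold c songs none
      = if songs.any (fun s => c.contains s) then some (csum c songs) else none := by
  intro songs
  induction songs with
  | nil => simp [vfold]
  | cons s rest ih =>
    by_cases h : c.contains s
    · have hstep : vfold c (s :: rest) none = vfold c rest (some (0 + c.getD s 0)) := by
        simp [vfold, h]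
      rw [hstep, vfold_some]; simp [csum, h]
    · have h0 : c.getD s 0 = 0 := PySem.Dict.getD_of_not_contains _ _ (by simpa using h)
      have hstep : vfold c (s :: rest) none = vfold c rest none := by
        simp [vfold, h]
      rw [hstep, ih]; simp [csum, h0, h]

lemma insert_eq_self {tmp : PySem.Dict String Int} {ar : String} {v : Int}
    (hn : tmp.keys.Nodup) (h : tmp.get? ar = some v) : tmp.insert ar v = tmp := by
  apply PySem.Dict.ext
  have hc : tmp.contains ar = true := by
    rw [PySem.Dict.contains_eq_isSome_get?, h]; rfl
  rw [PySem.Dict.items_insert_of_contains _ _ hc]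
  have heach : ∀ p ∈ tmp.items, (if p.1 == ar then ((ar, v) : String × Int) else p) = p := by
    intro p hp
    by_cases hpk : p.1 == ar
    · have hp1 : p.1 = ar := by simpa using hpk
      have h1 : tmp.get? p.1 = some p.2 := PySem.Dict.get?_of_mem_items _ hp hn
      rw [hp1, h] at h1
      have hv2 : p.2 = v := (Option.some_inj.mp h1).symm
      rw [if_pos hpk, ← hp1, ← hv2]
    · simp [hpk]
  calc tmp.items.map (fun p => if p.1 == ar then ((ar, v) : String × Int) else p)
      = tmp.items.map id := List.map_congr_left heach
    _ = tmp.items := List.map_id _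

-- A's inner loop over one artist's song list, for an arbitrary accumulator dict.
lemma innerA (c : PySem.Dict String Int) (ar : String) :
    ∀ (songs : List String) (tmp : PySem.Dict String Int), tmp.keys.Nodup →
      songs.foldl (fun tmp song =>
          if c.contains song then
            if !(tmp.contains ar) then tmp.insert ar (c.getD song 0)
            else tmp.insert ar (tmp.getD ar 0 + c.getD song 0)
          else tmp) tmp
      = match vfold c songs (tmp.get? ar) with
        | none => tmp
        | some v => tmp.insert ar v := by
  intro songs
  induction songs with
  | nil =>
    intro tmp hn
    simp only [List.foldl_nil, vfold, List.foldl_nil]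
    cases h : tmp.get? ar with
    | none => rfl
    | some v => exact (insert_eq_self hn h).symm
  | cons s rest ih =>
    intro tmp hn
    by_cases h : c.contains s
    · have hstep : (if c.contains s then
            if !(tmp.contains ar) then tmp.insert ar (c.getD s 0)
            else tmp.insert ar (tmp.getD ar 0 + c.getD s 0)
          else tmp) = tmp.insert ar ((tmp.get? ar).getD 0 + c.getD s 0) := by
        rw [if_pos h]
        cases hg : tmp.get? ar with
        | none =>
          have hcf : tmp.contains ar = false := (PySem.Dict.get?_eq_none_iff_contains _ _).mp hg
          simp [hcf]
        | some w =>
          have hct : tmp.contains ar = true := by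
            rw [PySem.Dict.contains_eq_isSome_get?, hg]; rfl
          simp [hct, PySem.Dict.getD_eq_get?_getD, hg]
      rw [List.foldl_cons, hstep]
      rw [ih _ (PySem.Dict.nodup_keys_insert _ _ _ hn)]
      rw [PySem.Dict.get?_insert_self]
      have hv := vfold_some c rest ((tmp.get? ar).getD 0 + c.getD s 0)
      rw [hv]
      have hsh : vfold c (s :: rest) (tmp.get? ar)
          = vfold c rest (some ((tmp.get? ar).getD 0 + c.getD s 0)) := by
        simp [vfold, h]
      rw [hsh, hv]
      simp [PySem.Dict.insert_insert_self]
    · rw [List.foldl_cons, if_neg h]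
      rw [ih _ hn]
      have hsh : vfold c (s :: rest) (tmp.get? ar) = vfold c rest (tmp.get? ar) := by
        simp [vfold, h]
      rw [hsh]

-- A's outer loop over the artist list, started from fresh keys, builds the items by filterMap.
lemma outerA (c : PySem.Dict String Int) (dd : PySem.Dict String (List String)) :
    ∀ (l : List String) (tmp : PySem.Dict String Int), l.Nodup → tmp.keys.Nodup →
      (∀ ar ∈ l, tmp.get? ar = none) →
      (l.foldl (fun tmp ar =>
          (dd.getD ar []).foldl (fun tmp song =>
            if c.contains song then
              if !(tmp.contains ar) then tmp.insert ar (c.getD song 0)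
              else tmp.insert ar (tmp.getD ar 0 + c.getD song 0)
            else tmp) tmp) tmp).items
      = tmp.items ++ l.filterMap (fun ar =>
          (vfold c (dd.getD ar []) none).map (fun v => (ar, v))) := by
  intro l
  induction l with
  | nil => intro tmp _ _ _; simp
  | cons ar rest ih =>
    intro tmp hl hn hfresh
    rw [List.foldl_cons]
    have hget : tmp.get? ar = none := hfresh ar (by simp)
    rw [innerA c ar _ tmp hn, hget]
    cases hvf : vfold c (dd.getD ar []) none with
    | none =>
      rw [ih tmp (List.nodup_cons.mp hl).2 hn (fun a ha => hfresh a (by simp [ha]))]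
      simp [hvf]
    | some v =>
      have hcf : tmp.contains ar = false := (PySem.Dict.get?_eq_none_iff_contains _ _).mp hget
      have hnotmem := (List.nodup_cons.mp hl).1
      rw [ih (tmp.insert ar v) (List.nodup_cons.mp hl).2
            (PySem.Dict.nodup_keys_insert _ _ _ hn)
            (fun a ha => by
              rw [PySem.Dict.get?_insert_of_ne _ _ (by rintro rfl; exact hnotmem ha)]
              exact hfresh a (by simp [ha]))]
      rw [PySem.Dict.items_insert_of_not_contains _ _ hcf]
      simp [hvf]

-- B's per-song inner loop: the effect on one artist's accumulated entry.
lemma innerB (cnt : Int) (ar : String) :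
    ∀ (las : List String) (acc : PySem.Dict String Int),
      ((las.foldl (fun acc x => acc.insert x (acc.getD x 0 + cnt)) acc)).get? ar
      = if ar ∈ las then some (acc.getD ar 0 + (las.count ar : Int) * cnt) else acc.get? ar := by
  intro las
  induction las with
  | nil => intro acc; simp
  | cons x rest ih =>
    intro acc
    rw [List.foldl_cons, ih]
    by_cases hx : ar = x
    · subst hx
      by_cases hr : ar ∈ rest
      · rw [if_pos hr, if_pos (by simp)]
        rw [PySem.Dict.getD_insert]
        rw [List.count_cons]
        simp only [beq_self_eq_true, if_true]
        push_cast; ring_nf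
      · rw [if_neg hr, if_pos (by simp)]
        rw [PySem.Dict.get?_insert]
        rw [List.count_cons, List.count_eq_zero_of_not_mem hr]
        simp
    · by_cases hr : ar ∈ rest
      · rw [if_pos hr, if_pos (by simp [hr])]
        rw [PySem.Dict.getD_insert, if_neg hx]
        rw [List.count_cons, if_neg (by simpa using Ne.symm hx)]
        simp
      · rw [if_neg hr, if_neg (by simp [hr, hx])]
        rw [PySem.Dict.get?_insert, if_neg hx]

-- Weight contributed by one counter entry to one artist.
def wgt (s2a : PySem.Dict String (List String)) (ar : String) (q : String × Int) : Int :=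
  ((s2a.getD q.1 []).count ar : Int) * q.2

lemma sum_wgt_zero (s2a : PySem.Dict String (List String)) (ar : String)
    (qs : List (String × Int)) (h : ∀ q ∈ qs, ar ∉ s2a.getD q.1 []) :
    (qs.map (wgt s2a ar)).sum = 0 := by
  apply List.sum_eq_zero
  intro x hx
  obtain ⟨q, hq, rfl⟩ := List.mem_map.mp hx
  have hz : (s2a.getD q.1 []).count ar = 0 := List.count_eq_zero_of_not_mem (h q hq)
  simp [wgt, hz]

-- B's middle loop over the counter's items.
lemma midB (s2a : PySem.Dict String (List String)) (ar : String) :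
    ∀ (qs : List (String × Int)) (acc : PySem.Dict String Int),
      (qs.foldl (fun acc q =>
          (s2a.getD q.1 []).foldl (fun acc x => acc.insert x (acc.getD x 0 + q.2)) acc) acc).get? ar
      = if qs.any (fun q => decide (ar ∈ s2a.getD q.1 []))
        then some (acc.getD ar 0 + (qs.map (wgt s2a ar)).sum)
        else acc.get? ar := by
  intro qs
  induction qs with
  | nil => intro acc; simp
  | cons q rest ih =>
    intro acc
    rw [List.foldl_cons, ih]
    by_cases hq : ar ∈ s2a.getD q.1 []
    · have h1 := innerB q.2 ar (s2a.getD q.1 []) acc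
      rw [if_pos hq] at h1
      have hD : (((s2a.getD q.1 []).foldl (fun acc x => acc.insert x (acc.getD x 0 + q.2)) acc)).getD ar 0
          = acc.getD ar 0 + wgt s2a ar q := by
        rw [PySem.Dict.getD_eq_get?_getD, h1]; rfl
      by_cases hrest : rest.any (fun q => decide (ar ∈ s2a.getD q.1 []))
      · rw [if_pos hrest, if_pos (by simp [hq]), hD]
        simp [wgt]; ring
      · rw [if_neg hrest, if_pos (by simp [hq]), h1]
        have hz : (rest.map (wgt s2a ar)).sum = 0 := by
          apply sum_wgt_zero
          intro q2 hq2
          by_contra hmem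
          exact hrest (List.any_eq_true.mpr ⟨q2, hq2, by simpa using hmem⟩)
        simp [wgt, hz]
    · have h1 := innerB q.2 ar (s2a.getD q.1 []) acc
      rw [if_neg hq] at h1
      have hw : wgt s2a ar q = 0 := by
        simp [wgt, List.count_eq_zero_of_not_mem hq]
      by_cases hrest : rest.any (fun q => decide (ar ∈ s2a.getD q.1 []))
      · have hD : (((s2a.getD q.1 []).foldl (fun acc x => acc.insert x (acc.getD x 0 + q.2)) acc)).getD ar 0
            = acc.getD ar 0 := by
          rw [PySem.Dict.getD_eq_get?_getD, h1, ← PySem.Dict.getD_eq_get?_getD]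
        rw [if_pos hrest, if_pos (by simp [hrest]), hD]
        simp [hw]
      · rw [if_neg hrest, if_neg (by simp [hq, hrest]), h1]

-- B's final reordering pass.
lemma finalB (acc : PySem.Dict String Int) :
    ∀ (l : List String) (out : PySem.Dict String Int), l.Nodup → out.keys.Nodup →
      (∀ ar ∈ l, out.get? ar = none) →
      (l.foldl (fun out ar =>
          match acc.get? ar with
          | some v => out.insert ar v
          | none => out) out).items
      = out.items ++ l.filterMap (fun ar => (acc.get? ar).map (fun v => (ar, v))) := by
  intro l
  induction l with
  | nil => intro out _ _ _; simp
  | cons ar rest ih =>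
    intro out hl hn hfresh
    rw [List.foldl_cons]
    cases hv : acc.get? ar with
    | none =>
      rw [ih out (List.nodup_cons.mp hl).2 hn (fun a ha => hfresh a (by simp [ha]))]
      simp [hv]
    | some v =>
      have hget : out.get? ar = none := hfresh ar (by simp)
      have hcf : out.contains ar = false := (PySem.Dict.get?_eq_none_iff_contains _ _).mp hget
      have hnotmem := (List.nodup_cons.mp hl).1
      rw [ih (out.insert ar v) (List.nodup_cons.mp hl).2
            (PySem.Dict.nodup_keys_insert _ _ _ hn)
            (fun a ha => by
              rw [PySem.Dict.get?_insert_of_ne _ _ (by rintro rfl; exact hnotmem ha)]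
              exact hfresh a (by simp [ha]))]
      rw [PySem.Dict.items_insert_of_not_contains _ _ hcf]
      simp [hv]

-- The inverted index, inner loop: one artist's contribution to one song's bucket.
lemma s2aInner (ar2 : String) (s : String) :
    ∀ (songs : List String) (m : PySem.Dict String (List String)),
      (songs.foldl (fun m s2 => m.modify s2 [] (fun l => l ++ [ar2])) m).getD s []
      = m.getD s [] ++ List.replicate (songs.count s) ar2 := by
  intro songs
  induction songs with
  | nil => intro m; simp
  | cons s2 rest ih =>
    intro m
    rw [List.foldl_cons, ih]
    rw [PySem.Dict.getD_modify]
    by_cases h : s = s2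
    · subst h
      rw [if_pos rfl, List.count_cons, if_pos (by simp)]
      rw [List.append_assoc]
      congr 1
    · rw [if_neg h, List.count_cons, if_neg (by simpa using Ne.symm h)]
      simp

-- The inverted index, outer loop: the bucket for song s lists p.1 once per occurrence of s in p.2.
lemma s2aOuter (s : String) :
    ∀ (items : List (String × List String)) (m : PySem.Dict String (List String)),
      (items.foldl (fun m p => p.2.foldl (fun m s2 => m.modify s2 [] (fun l => l ++ [p.1])) m) m).getD s []
      = m.getD s [] ++ items.flatMap (fun p => List.replicate (p.2.count s) p.1) := by
  intro items
  induction items with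
  | nil => intro m; simp
  | cons p rest ih =>
    intro m
    rw [List.foldl_cons, ih, s2aInner]
    simp

lemma count_flat_buckets (ar : String) (songs : List String) (s : String) :
    ∀ (items : List (String × List String)), (items.map (fun p => p.1)).Nodup → (ar, songs) ∈ items →
      (items.flatMap (fun p => List.replicate (p.2.count s) p.1)).count ar = songs.count s := by
  intro items
  induction items with
  | nil => intro _ h; simp at h
  | cons p rest ih =>
    intro hn hmem
    rw [List.flatMap_cons, List.count_append, List.count_replicate]
    rw [List.map_cons, List.nodup_cons] at hn
    have hn2 : p.1 ∉ rest.map (fun p => p.1) ∧ (rest.map (fun p => p.1)).Nodup := ⟨hn.1, hn.2⟩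
    rcases List.mem_cons.mp hmem with heq | hmem2
    · subst heq
      have hz : (rest.flatMap (fun p => List.replicate (p.2.count s) p.1)).count ar = 0 := by
        apply List.count_eq_zero_of_not_mem
        intro hc
        obtain ⟨p2, hp2, hc2⟩ := List.mem_flatMap.mp hc
        have he : ar = p2.1 := List.eq_of_mem_replicate hc2
        exact hn2.1 (he ▸ List.mem_map.mpr ⟨p2, hp2, rfl⟩)
      rw [hz]; simp
    · have hne : (p.1 == ar) = false := by
        apply beq_false_of_ne
        intro h
        exact hn2.1 (h ▸ List.mem_map.mpr ⟨(ar, songs), hmem2, rfl⟩)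
      rw [hne, ih hn2.2 hmem2]
      simp

-- Σ over a dict's items of (value if key = x else 0) is the lookup.
lemma sum_if_items (x : String) :
    ∀ (ps : List (String × Int)), (ps.map (fun p => p.1)).Nodup →
      ∀ (v : Int), (x, v) ∈ ps → (ps.map (fun q => if q.1 == x then q.2 else 0)).sum = v := by
  intro ps
  induction ps with
  | nil => intro _ v h; simp at h
  | cons p rest ih =>
    intro hn v hmem
    rw [List.map_cons, List.nodup_cons] at hn
    have hn2 : p.1 ∉ rest.map (fun p => p.1) ∧ (rest.map (fun p => p.1)).Nodup := ⟨hn.1, hn.2⟩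
    rw [List.map_cons, List.sum_cons]
    rcases List.mem_cons.mp hmem with heq | hmem2
    · subst heq
      have hz : (rest.map (fun q => if q.1 == x then q.2 else 0)).sum = 0 := by
        apply List.sum_eq_zero
        intro y hy
        obtain ⟨q, hq, rfl⟩ := List.mem_map.mp hy
        have hne : (q.1 == x) = false := by
          apply beq_false_of_ne
          intro h
          exact hn2.1 (h ▸ List.mem_map.mpr ⟨q, hq, rfl⟩)
        simp [hne]
      rw [if_pos (show (((x, v) : String × Int).1 == x) = true by simp), hz]
      simp
    · have hne : (p.1 == x) = false := by
        apply beq_false_of_ne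
        intro h
        exact hn2.1 (h ▸ List.mem_map.mpr ⟨(x, v), hmem2, rfl⟩)
      rw [hne, ih hn2.2 v hmem2]
      simp

lemma sum_if_getD (c : PySem.Dict String Int) (hn : c.keys.Nodup) (x : String) :
    (c.items.map (fun q => if q.1 == x then q.2 else 0)).sum = c.getD x 0 := by
  cases hg : c.get? x with
  | none =>
    have hnc : c.contains x = false := (PySem.Dict.get?_eq_none_iff_contains _ _).mp hg
    rw [PySem.Dict.getD_of_not_contains _ _ hnc]
    apply List.sum_eq_zero
    intro y hy
    obtain ⟨q, hq, rfl⟩ := List.mem_map.mp hy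
    have hne : (q.1 == x) = false := by
      apply beq_false_of_ne
      intro h
      have hk : x ∈ c.keys := h ▸ PySem.Dict.mem_keys_of_mem_items _ hq
      rw [← PySem.Dict.contains_iff_mem_keys] at hk
      rw [hnc] at hk; exact Bool.false_ne_true hk
    simp [hne]
  | some v =>
    rw [PySem.Dict.getD_of_get?_eq_some _ _ hg]
    exact sum_if_items x c.items (by simpa [PySem.Dict.keys] using hn) v
      (PySem.Dict.mem_items_of_get?_eq_some _ hg)

-- Exchange of summation: per-counter weights for one artist = A's per-song sum.
lemma sum_exchange (c : PySem.Dict String Int) (hn : c.keys.Nodup) :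
    ∀ (songs : List String),
      (c.items.map (fun q => ((songs.count q.1 : Int)) * q.2)).sum = csum c songs := by
  intro songs
  induction songs with
  | nil =>
    simp only [csum, List.map_nil, List.sum_nil]
    apply List.sum_eq_zero
    intro y hy
    obtain ⟨q, hq, rfl⟩ := List.mem_map.mp hy
    simp
  | cons x rest ih =>
    have hsplit : (c.items.map (fun q => (((x :: rest).count q.1 : Int)) * q.2)).sum
        = (c.items.map (fun q => ((rest.count q.1 : Int)) * q.2
            + (if q.1 == x then q.2 else 0))).sum := by
      apply congrArg
      apply List.map_congr_left
      intro q hq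
      by_cases h : q.1 = x
      · subst h
        simp only [List.count_cons, beq_self_eq_true]
        push_cast; ring
      · have h1 : (x == q.1) = false := beq_false_of_ne (Ne.symm h)
        have h2 : (q.1 == x) = false := beq_false_of_ne h
        simp only [List.count_cons, h1, h2, Bool.false_eq_true, if_false]
        push_cast; ring
    rw [hsplit, PySem.List.sum_map_add_int, ih, sum_if_getD c hn x]
    simp only [csum, List.map_cons, List.sum_cons]
    ring

-- Per-counter equality of the two programs' result dicts (as item lists).
lemma percounter (a2s : List (String × List String)) (counter : List (String × Int)) :
    (let d := PySem.Dict.ofList a2s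
     let c := PySem.Dict.ofList counter
     (d.keys.foldl (fun tmp ar =>
        (d.getD ar []).foldl (fun tmp song =>
          if c.contains song then
            if !(tmp.contains ar) then tmp.insert ar (c.getD song 0)
            else tmp.insert ar (tmp.getD ar 0 + c.getD song 0)
          else tmp) tmp) (PySem.Dict.empty : PySem.Dict String Int)).items)
    = (let d := PySem.Dict.ofList a2s
       let s2a := d.items.foldl (fun m p =>
           p.2.foldl (fun m s => m.modify s [] (fun l => l ++ [p.1])) m)
         (PySem.Dict.empty : PySem.Dict String (List String))
       let c := PySem.Dict.ofList counter
       let acc := c.items.foldl (fun acc q =>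
           (s2a.getD q.1 []).foldl (fun acc ar => acc.insert ar (acc.getD ar 0 + q.2)) acc)
         (PySem.Dict.empty : PySem.Dict String Int)
       (d.keys.foldl (fun out ar =>
           match acc.get? ar with
           | some v => out.insert ar v
           | none => out) (PySem.Dict.empty : PySem.Dict String Int)).items) := by
  dsimp only
  have hdn : (PySem.Dict.ofList a2s).keys.Nodup := PySem.Dict.nodup_keys_ofList a2s
  have hcn : (PySem.Dict.ofList counter).keys.Nodup := PySem.Dict.nodup_keys_ofList counter
  rw [outerA (PySem.Dict.ofList counter) (PySem.Dict.ofList a2s) (PySem.Dict.ofList a2s).keys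
        PySem.Dict.empty hdn PySem.Dict.nodup_keys_empty (fun ar _ => PySem.Dict.get?_empty ar)]
  rw [finalB _ (PySem.Dict.ofList a2s).keys
        PySem.Dict.empty hdn PySem.Dict.nodup_keys_empty (fun ar _ => PySem.Dict.get?_empty ar)]
  apply List.filterMap_congr
  intro ar har
  have hex : ∃ p ∈ (PySem.Dict.ofList a2s).items, p.1 = ar := by
    simpa [PySem.Dict.keys, List.mem_map] using har
  obtain ⟨p, hp, hpe⟩ := hex
  have hkn : ((PySem.Dict.ofList a2s).items.map (fun p => p.1)).Nodup := by
    simpa [PySem.Dict.keys] using hdn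
  have hgd : (PySem.Dict.ofList a2s).getD ar [] = p.2 := by
    subst hpe
    exact PySem.Dict.getD_of_mem_items _ hp hdn []
  rw [hgd, vfold_none]
  rw [midB _ ar (PySem.Dict.ofList counter).items PySem.Dict.empty]
  have hbucket : ∀ s, ((PySem.Dict.ofList a2s).items.foldl (fun m p =>
        p.2.foldl (fun m s2 => m.modify s2 [] (fun l => l ++ [p.1])) m)
        (PySem.Dict.empty : PySem.Dict String (List String))).getD s []
      = (PySem.Dict.ofList a2s).items.flatMap (fun p => List.replicate (p.2.count s) p.1) := by
    intro s
    rw [s2aOuter s _ PySem.Dict.empty, PySem.Dict.getD_empty, List.nil_append]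
  have hcount : ∀ s, (((PySem.Dict.ofList a2s).items.foldl (fun m p =>
        p.2.foldl (fun m s2 => m.modify s2 [] (fun l => l ++ [p.1])) m)
        (PySem.Dict.empty : PySem.Dict String (List String))).getD s []).count ar = p.2.count s := by
    intro s
    rw [hbucket s]
    subst hpe
    exact count_flat_buckets p.1 p.2 s _ hkn hp
  have hmem_iff : ∀ s, (ar ∈ ((PySem.Dict.ofList a2s).items.foldl (fun m p =>
        p.2.foldl (fun m s2 => m.modify s2 [] (fun l => l ++ [p.1])) m)
        (PySem.Dict.empty : PySem.Dict String (List String))).getD s []) ↔ s ∈ p.2 := by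
    intro s
    rw [← List.count_pos_iff, hcount s, List.count_pos_iff]
  have hcond : ((PySem.Dict.ofList counter).items.any (fun q =>
        decide (ar ∈ ((PySem.Dict.ofList a2s).items.foldl (fun m p =>
          p.2.foldl (fun m s2 => m.modify s2 [] (fun l => l ++ [p.1])) m)
          (PySem.Dict.empty : PySem.Dict String (List String))).getD q.1 [])))
      = (p.2.any (fun s => (PySem.Dict.ofList counter).contains s)) := by
    rcases hb : p.2.any (fun s => (PySem.Dict.ofList counter).contains s) with _ | _
    · rw [List.any_eq_false]
      intro q hq
      simp only [decide_eq_true_eq, hmem_iff q.1]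
      intro hmem
      rw [List.any_eq_false] at hb
      have := hb q.1 hmem
      rw [PySem.Dict.contains_iff_mem_keys] at this
      exact this (PySem.Dict.mem_keys_of_mem_items _ hq)
    · rw [List.any_eq_true] at hb ⊢
      obtain ⟨s, hs, hcs⟩ := hb
      rw [PySem.Dict.contains_iff_mem_keys] at hcs
      simp only [PySem.Dict.keys, List.mem_map] at hcs
      obtain ⟨q, hq, rfl⟩ := hcs
      exact ⟨q, hq, by simpa [hmem_iff q.1] using hs⟩
  have hval : ((PySem.Dict.ofList counter).items.map (wgt ((PySem.Dict.ofList a2s).items.foldl (fun m p =>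
        p.2.foldl (fun m s2 => m.modify s2 [] (fun l => l ++ [p.1])) m)
        (PySem.Dict.empty : PySem.Dict String (List String))) ar)).sum
      = csum (PySem.Dict.ofList counter) p.2 := by
    rw [List.map_congr_left (fun q _ => by
      simp only [wgt, hcount q.1] : ∀ q ∈ (PySem.Dict.ofList counter).items, _ = ((p.2.count q.1 : Int)) * q.2)]
    exact sum_exchange _ hcn p.2
  rw [hcond, hval]
  rcases p.2.any (fun s => (PySem.Dict.ofList counter).contains s) with _ | _
  · simp
  · simp

-- ===== VERDICT (by name: the statement is the Claim_ definition above) =====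
theorem get_artist_play_spec : Claim_equal_get_artist_play := by
  intro a2s play _
  unfold Spec_get_artist_play get_artist_play get_artist_play_alt
  dsimp only
  rw [PySem.List.foldl_append_singleton_eq_map, PySem.List.foldl_append_singleton_eq_map]
  simp only [List.nil_append]
  exact List.map_congr_left (fun counter _ => percounter a2s counter)
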